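-- pv_equiv track=rewrite | github.com/AdrianSuliga/WDI | Kolokwia/ex_4_21-22.py | isItInFibbonaci
-- ===== SOURCE A (Python) =====
-- def isItInFibbonaci(n1, n2): # sprawdzamy czy 2 liczby należą do ciągu Fib.
--     fL, fM, fR = 0, 1, 1
--     while True:
--         if fM == n1 and fR == n2: return True
--         if fR > n2: return False
--         fL = fM
--         fM = fR
--         fR = fL + fM
-- ===== SOURCE B (Python) =====
-- def isItInFibbonaci(n1, n2):
--     # Run the Fibonacci recurrence backward on the pair until it hits the
--     # unit base pair or becomes impossible.
--     while True:
--         if n1 == 1 and n2 == 1: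
--             return True
--         if n1 < 1 or n2 < n1 or n2 > 2 * n1:
--             return False
--         n1, n2 = n2 - n1, n1
-- ===== Notes on version B (the rewrite author's own statement) =====
-- stated objective: alternative
-- what changed: B runs the Fibonacci recurrence backward, reducing the pair (n1,n2) -> (n2-n1,n1) down to the unit base pair with interval guards, instead of A's forward walk through the sequence comparing each adjacent pair.
import Mathlib
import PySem

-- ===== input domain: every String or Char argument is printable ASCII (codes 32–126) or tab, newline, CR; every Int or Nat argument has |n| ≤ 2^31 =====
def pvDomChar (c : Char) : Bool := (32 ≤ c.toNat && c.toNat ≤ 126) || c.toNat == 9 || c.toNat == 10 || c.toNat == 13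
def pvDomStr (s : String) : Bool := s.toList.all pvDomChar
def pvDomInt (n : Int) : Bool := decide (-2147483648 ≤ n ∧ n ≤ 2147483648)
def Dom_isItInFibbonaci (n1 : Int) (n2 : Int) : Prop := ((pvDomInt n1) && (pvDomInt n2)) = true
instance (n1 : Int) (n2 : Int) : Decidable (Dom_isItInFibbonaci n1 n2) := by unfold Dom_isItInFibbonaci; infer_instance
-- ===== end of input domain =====

-- B replaces A's forward walk through the Fibonacci sequence by running the
-- recurrence backward on the input pair (alternative decomposition; same cost).

-- ===== PORT A =====
-- A's 'while True' loop; the invariants 1 ≤ fM, 1 ≤ fR (true of every state the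
-- Python loop reaches) are carried as proof arguments only for termination.
def isItInFibbonaciLoopA (n1 n2 fL fM fR : Int) (hM : 1 ≤ fM) (hR : 1 ≤ fR) : Bool :=
  if fM = n1 ∧ fR = n2 then true
  else if fR > n2 then false
  else isItInFibbonaciLoopA n1 n2 fM fR (fM + fR) hR (by omega)
termination_by (n2 + 1 - fR).toNat
decreasing_by omega

def isItInFibbonaci (n1 : Int) (n2 : Int) : Bool :=
  isItInFibbonaciLoopA n1 n2 0 1 1 (by norm_num) (by norm_num)

-- ===== PORT B =====
def isItInFibbonaciLoopB (n1 n2 : Int) : Bool :=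
  if n1 = 1 ∧ n2 = 1 then true
  else if n1 < 1 ∨ n2 < n1 ∨ n2 > 2 * n1 then false
  else isItInFibbonaciLoopB (n2 - n1) n1
termination_by (n1 + n2).toNat
decreasing_by omega

def isItInFibbonaci_alt (n1 : Int) (n2 : Int) : Bool :=
  isItInFibbonaciLoopB n1 n2

-- ===== PRECONDITION & SPEC =====
def Spec_isItInFibbonaci (n1 : Int) (n2 : Int) (out : Bool) : Prop := out = isItInFibbonaci_alt n1 n2
instance (n1 : Int) (n2 : Int) (out : Bool) : Decidable (Spec_isItInFibbonaci n1 n2 out) := by unfold Spec_isItInFibbonaci; infer_instance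

-- ===== CLAIM (what is proved, stated in full; the proofs are below) =====
def Claim_equal_isItInFibbonaci : Prop := ∀ (n1 : Int) (n2 : Int), Dom_isItInFibbonaci n1 n2 → Spec_isItInFibbonaci n1 n2 (isItInFibbonaci n1 n2)

-- ===== LEMMAS AND PROOFS =====

-- Generalised Fibonacci sequence with seed (a, b).
def fibF (a b : Int) : Nat → Int
  | 0 => a
  | 1 => b
  | (k+2) => fibF a b k + fibF a b (k+1)

lemma fibF_pos (a b : Int) (ha : 1 ≤ a) (hb : 1 ≤ b) : ∀ k, 1 ≤ fibF a b k := by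
  intro k
  induction k using Nat.twoStepInduction with
  | zero => exact ha
  | one => exact hb
  | more k ih1 ih2 => simp only [fibF]; omega

lemma fibF_ge (a b : Int) (ha : 1 ≤ a) (hb : 1 ≤ b) : ∀ k, b ≤ fibF a b (k+1) := by
  intro k
  induction k using Nat.twoStepInduction with
  | zero => exact le_refl b
  | one => show b ≤ a + b; omega
  | more k ih1 ih2 =>
      show b ≤ fibF a b (k+1) + fibF a b (k+2)
      have h1 : b ≤ fibF a b (k+1) := ih1
      have := fibF_pos a b ha hb (k+2)
      omega

lemma fibF_shift (a b : Int) : ∀ k, fibF b (a + b) k = fibF a b (k+1) := by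
  intro k
  induction k using Nat.twoStepInduction with
  | zero => rfl
  | one => rfl
  | more k ih1 ih2 =>
      show fibF b (a+b) k + fibF b (a+b) (k+1) = fibF a b (k+1) + fibF a b (k+2)
      rw [ih1, ih2]

-- A's loop returns true iff (n1, n2) is a consecutive pair of the sequence seeded (fM, fR).
lemma loopA_char (n1 n2 fL fM fR : Int) (hM : 1 ≤ fM) (hR : 1 ≤ fR) :
    isItInFibbonaciLoopA n1 n2 fL fM fR hM hR = true ↔
      ∃ k, n1 = fibF fM fR k ∧ n2 = fibF fM fR (k+1) := by
  fun_induction isItInFibbonaciLoopA n1 n2 fL fM fR hM hR with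
  | case1 fL fM fR hM hR h =>
      exact iff_of_true rfl ⟨0, h.1.symm, h.2.symm⟩
  | case2 fL fM fR hM hR h hgt =>
      constructor
      · intro hx; simp at hx
      rintro ⟨k, -, hn2⟩
      have := fibF_ge fM fR hM hR k
      omega
  | case3 fL fM fR hM hR h hgt ih =>
      rw [ih]
      constructor
      · rintro ⟨k, h1, h2⟩
        refine ⟨k+1, ?_, ?_⟩
        · rw [← fibF_shift fM fR k]; exact h1
        · rw [← fibF_shift fM fR (k+1)]; exact h2
      · rintro ⟨k, h1, h2⟩
        match k with
        | 0 => exact absurd ⟨h1.symm, h2.symm⟩ h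
        | k+1 =>
            refine ⟨k, ?_, ?_⟩
            · rw [fibF_shift fM fR k]; exact h1
            · rw [fibF_shift fM fR (k+1)]; exact h2

lemma fib11_mono (k : Nat) : fibF 1 1 k ≤ fibF 1 1 (k+1) := by
  induction k using Nat.twoStepInduction with
  | zero => norm_num [fibF]
  | one => norm_num [fibF]
  | more k ih1 ih2 =>
      show fibF 1 1 k + fibF 1 1 (k+1) ≤ fibF 1 1 (k+1) + fibF 1 1 (k+2)
      have := fibF_pos 1 1 (by norm_num) (by norm_num) k
      have := fibF_pos 1 1 (by norm_num) (by norm_num) (k+1)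
      simp only [fibF]
      omega

lemma fib11_double (k : Nat) : fibF 1 1 (k+1) ≤ 2 * fibF 1 1 k := by
  match k with
  | 0 => norm_num [fibF]
  | k+1 =>
      show fibF 1 1 k + fibF 1 1 (k+1) ≤ 2 * fibF 1 1 (k+1)
      have := fib11_mono k
      omega

-- B's loop returns true iff (n1, n2) is a consecutive pair of the (1,1)-seeded sequence.
lemma loopB_char (n1 n2 : Int) :
    isItInFibbonaciLoopB n1 n2 = true ↔
      ∃ k, n1 = fibF 1 1 k ∧ n2 = fibF 1 1 (k+1) := by
  fun_induction isItInFibbonaciLoopB n1 n2 with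
  | case1 n1 n2 h =>
      exact iff_of_true rfl ⟨0, h.1, h.2⟩
  | case2 n1 n2 h hbad =>
      constructor
      · intro hx; simp at hx
      rintro ⟨k, h1, h2⟩
      have hp := fibF_pos 1 1 (by norm_num) (by norm_num) k
      have hm := fib11_mono k
      have hd := fib11_double k
      omega
  | case3 n1 n2 h hbad ih =>
      rw [ih]
      constructor
      · rintro ⟨k, h1, h2⟩
        refine ⟨k+1, h2, ?_⟩
        show n2 = fibF 1 1 k + fibF 1 1 (k+1)
        omega
      · rintro ⟨k, h1, h2⟩
        match k with
        | 0 =>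
            exfalso
            apply h
            constructor
            · simpa [fibF] using h1
            · simpa [fibF] using h2
        | k+1 =>
            refine ⟨k, ?_, h1⟩
            have : n2 = fibF 1 1 k + fibF 1 1 (k+1) := h2
            omega

-- ===== VERDICT (by name: the statement is the Claim_ definition above) =====
theorem isItInFibbonaci_spec : Claim_equal_isItInFibbonaci := by
  intro n1 n2 _
  unfold Spec_isItInFibbonaci isItInFibbonaci isItInFibbonaci_alt
  have hA := loopA_char n1 n2 0 1 1 (by norm_num) (by norm_num)
  have hB := loopB_char n1 n2
  rw [← hB] at hA
  cases hLoopB : isItInFibbonaciLoopB n1 n2 <;>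
    cases hLoopA : isItInFibbonaciLoopA n1 n2 0 1 1 (by norm_num) (by norm_num) <;>
      simp_all
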